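-- pv_equiv track=rewrite | github.com/pushpa-info-14/python-programming | Data Structures & Algorithms/DSA Course/Step-16-Dynamic Programming/L18 Count Partitions With Given Difference - DP on Subsequences.py | countPartitions2
-- ===== SOURCE A (Python) =====
-- from typing import List
--
-- def countPartitions2(n: int, d: int, arr: List[int]) -> int:
--     mod = 10 ** 9 + 7
--     total = sum(arr)
--     if (total - d) < 0 or (total - d) % 2:
--         return 0
--     k = (sum(arr) - d) // 2
--     dp = [[0] * (k + 1) for _ in range(n)]
--
--     if arr[0] == 0:
--         dp[0][0] = 2
--     else:
--         dp[0][0] = 1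
--     if arr[0] != 0 and arr[0] <= k:
--         dp[0][arr[0]] = 1
--
--     for i in range(1, n):
--         for cur in range(k + 1):
--             not_take = dp[i - 1][cur]
--             take = 0
--             if arr[i] <= cur:
--                 take = dp[i - 1][cur - arr[i]]
--             dp[i][cur] = take + not_take
--     return dp[n - 1][k] % mod
-- ===== SOURCE B (Python) =====
-- def countPartitions2(n, d, arr):
--     # Top-down memoized recursion on (i, target) instead of A's bottom-up
--     # n x (k+1) table: only states actually reachable from (n-1, k) are computed.
--     mod = 10 ** 9 + 7
--     total = sum(arr)
--     if (total - d) < 0 or (total - d) % 2: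
--         return 0
--     k = (total - d) // 2
--     memo = {}
--
--     def f(i, target):
--         if i == 0:
--             if arr[0] == 0 and target == 0:
--                 return 2
--             if target == 0 or target == arr[0]:
--                 return 1
--             return 0
--         if (i, target) in memo:
--             return memo[(i, target)]
--         res = f(i - 1, target)
--         if arr[i] <= target:
--             res += f(i - 1, target - arr[i])
--         memo[(i, target)] = res
--         return res
--
--     return f(n - 1, k) % mod
-- ===== Notes on version B (the rewrite author's own statement) =====
-- stated objective: alternative
-- what changed: Replaces A's bottom-up n x (k+1) DP table filled row by row over every target 0..k with top-down memoized recursion f(i,target) started at (n-1,k), which only visits the states reachable from the query.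
-- outside the precondition, e.g. on countPartitions2(1, -3, [-1]): A returns 1, B returns 0
import Mathlib
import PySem

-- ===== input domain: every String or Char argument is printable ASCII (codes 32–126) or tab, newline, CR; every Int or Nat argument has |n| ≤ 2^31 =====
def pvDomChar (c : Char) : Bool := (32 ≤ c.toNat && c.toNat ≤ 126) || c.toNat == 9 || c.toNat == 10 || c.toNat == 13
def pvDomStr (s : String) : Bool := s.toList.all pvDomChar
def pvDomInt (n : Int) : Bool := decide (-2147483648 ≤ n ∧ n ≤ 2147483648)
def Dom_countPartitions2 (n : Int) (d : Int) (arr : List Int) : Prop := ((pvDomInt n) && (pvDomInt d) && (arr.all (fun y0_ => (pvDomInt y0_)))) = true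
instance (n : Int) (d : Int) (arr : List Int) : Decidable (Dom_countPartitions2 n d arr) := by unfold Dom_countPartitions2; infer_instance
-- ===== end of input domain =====

-- B replaces A's bottom-up n×(k+1) DP table by top-down memoized recursion f(i,target)
-- started at (n-1,k) (objective: alternative; only states reachable from the query are computed).

-- ===== PORT A =====
-- Python list index assignment xs[i] = v (negative index wraps); out-of-range (an IndexError
-- in Python) is a no-op here — such inputs are excluded by Pre_countPartitions2.
def pvSetA (xs : List Int) (i : Int) (v : Int) : List Int :=
  let j := if i < 0 then i + xs.length else i
  if 0 ≤ j ∧ j < xs.length then xs.set j.toNat v else xs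

def countPartitions2 (n : Int) (d : Int) (arr : List Int) : Int :=
  let md : Int := 10 ^ 9 + 7
  let total := arr.sum
  if total - d < 0 ∨ PySem.Int.mod (total - d) 2 ≠ 0 then 0
  else
    let k := PySem.Int.floordiv (arr.sum - d) 2
    let a0 := PySem.List.pyGetD arr 0 0
    let row0 := List.replicate (k + 1).toNat (0 : Int)
    let row1 := pvSetA row0 0 (if a0 = 0 then 2 else 1)
    let row2 := if a0 ≠ 0 ∧ a0 ≤ k then pvSetA row1 a0 1 else row1
    let dp := (PySem.List.pyRange 1 n).foldl (fun dp i =>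
        let prev := PySem.List.pyGetD dp (i - 1) []
        dp ++ [(PySem.List.pyRange 0 (k + 1)).map (fun cur =>
          let notTake := PySem.List.pyGetD prev cur 0
          let take := if PySem.List.pyGetD arr i 0 ≤ cur
                      then PySem.List.pyGetD prev (cur - PySem.List.pyGetD arr i 0) 0 else 0
          take + notTake)]) [row2]
    PySem.Int.mod (PySem.List.pyGetD (PySem.List.pyGetD dp (n - 1) []) k 0) md

-- ===== PORT B =====
-- memoized recursion f(i, target); the memo dict is threaded through in call order
def fB (arr : List Int) : Nat → Int → PySem.Dict (Int × Int) Int → Int × PySem.Dict (Int × Int) Int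
  | 0, target, memo =>
      let a0 := PySem.List.pyGetD arr 0 0
      ((if a0 = 0 ∧ target = 0 then 2
        else if target = 0 ∨ target = a0 then 1 else 0), memo)
  | i + 1, target, memo =>
      match memo.get? ((i : Int) + 1, target) with
      | some v => (v, memo)
      | none =>
          let p1 := fB arr i target memo
          let ai := PySem.List.pyGetD arr ((i : Int) + 1) 0
          let p2 :=
            if ai ≤ target then
              let q := fB arr i (target - ai) p1.2
              (p1.1 + q.1, q.2)
            else p1
          (p2.1, p2.2.insert ((i : Int) + 1, target) p2.1)

def countPartitions2_alt (n : Int) (d : Int) (arr : List Int) : Int :=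
  let md : Int := 10 ^ 9 + 7
  let total := arr.sum
  if total - d < 0 ∨ PySem.Int.mod (total - d) 2 ≠ 0 then 0
  else
    let k := PySem.Int.floordiv (total - d) 2
    PySem.Int.mod (fB arr (n - 1).toNat k PySem.Dict.empty).1 md

-- ===== PRECONDITION & SPEC =====
-- Pre_ excludes the inputs where A raises IndexError (n < 1, n > len(arr), or a negative element
-- among arr[1:n] indexing past the row) and, when the early guard does not already return 0, the
-- inputs with a negative first element, on which A's dp[0][arr[0]] write wraps to the end of the
-- row via Python negative indexing — an artefact outside the subset-sum DP's natural nonnegative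
-- domain; B counts normally there.
def Pre_countPartitions2 (n : Int) (d : Int) (arr : List Int) : Prop :=
  (arr.sum - d < 0 ∨ PySem.Int.mod (arr.sum - d) 2 ≠ 0) ∨
  (1 ≤ n ∧ n ≤ arr.length ∧ ∀ x ∈ arr.take n.toNat, 0 ≤ x)
instance (n : Int) (d : Int) (arr : List Int) : Decidable (Pre_countPartitions2 n d arr) := by
  unfold Pre_countPartitions2; infer_instance

def pvWitness_countPartitions2 : Int × Int × List Int := (3, 0, [1, 1, 2])

def Spec_countPartitions2 (n : Int) (d : Int) (arr : List Int) (out : Int) : Prop := out = countPartitions2_alt n d arr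
instance (n : Int) (d : Int) (arr : List Int) (out : Int) : Decidable (Spec_countPartitions2 n d arr out) := by unfold Spec_countPartitions2; infer_instance

-- ===== CLAIM (what is proved, stated in full; the proofs are below) =====
def Claim_equal_countPartitions2 : Prop := ∀ (n : Int) (d : Int) (arr : List Int), Dom_countPartitions2 n d arr → Pre_countPartitions2 n d arr → Spec_countPartitions2 n d arr (countPartitions2 n d arr)

-- ===== LEMMAS AND PROOFS =====

-- The common specification: cntF l f s generalises "number of subsets of l with sum s"
-- over a seed function f; cnt l s is the subset count itself.
def cntF : List Int → (Int → Int) → Int → Int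
  | [], f, s => f s
  | x :: l, f, s => cntF l f s + cntF l f (s - x)

def dlt : Int → Int := fun t => if t = 0 then 1 else 0

def cnt (l : List Int) (s : Int) : Int := cntF l dlt s

theorem cntF_append_singleton (l : List Int) : ∀ (f : Int → Int) (x s : Int),
    cntF (l ++ [x]) f s = cntF l f s + cntF l f (s - x) := by
  induction l with
  | nil => intro f x s; simp [cntF]
  | cons y l ih =>
    intro f x s
    simp only [List.cons_append, cntF, ih]
    rw [sub_right_comm]
    ring

theorem cnt_append (l : List Int) (x s : Int) :
    cnt (l ++ [x]) s = cnt l s + cnt l (s - x) := cntF_append_singleton l dlt x s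

theorem cntF_neg (l : List Int) : ∀ (f : Int → Int), (∀ t, t < 0 → f t = 0) →
    (∀ x ∈ l, 0 ≤ x) → ∀ s, s < 0 → cntF l f s = 0 := by
  induction l with
  | nil => intro f hf _ s hs; exact hf s hs
  | cons x l ih =>
    intro f hf hl s hs
    have hx : 0 ≤ x := hl x (by simp)
    have hl' : ∀ y ∈ l, 0 ≤ y := fun y hy => hl y (by simp [hy])
    simp [cntF, ih f hf hl' s hs, ih f hf hl' (s - x) (by omega)]

theorem cnt_neg (l : List Int) (s : Int) (hl : ∀ x ∈ l, 0 ≤ x) (hs : s < 0) : cnt l s = 0 :=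
  cntF_neg l dlt (by intro t ht; simp [dlt]; omega) hl s hs

-- ---- B side: correctness of the memoized recursion ----

-- memo invariant: every stored entry is the subset count of the matching prefix
def InvB (arr : List Int) (m : PySem.Dict (Int × Int) Int) : Prop :=
  ∀ (i : Nat) (t v : Int), m.get? ((i : Int), t) = some v → v = cnt (arr.take (i + 1)) t

theorem cnt_singleton (a0 t : Int) (ha : 0 ≤ a0) (_ht : 0 ≤ t) :
    cnt [a0] t = (if a0 = 0 ∧ t = 0 then 2 else if t = 0 ∨ t = a0 then 1 else 0) := by
  simp only [cnt, cntF, dlt]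
  split_ifs <;> omega

theorem fB_correct (arr : List Int) : ∀ (i : Nat) (t : Int) (m : PySem.Dict (Int × Int) Int),
    (i : Int) + 1 ≤ arr.length → (∀ y ∈ arr.take (i + 1), 0 ≤ y) → 0 ≤ t → InvB arr m →
    (fB arr i t m).1 = cnt (arr.take (i + 1)) t ∧ InvB arr (fB arr i t m).2 := by
  intro i
  induction i with
  | zero =>
    intro t m hlen hnn ht hm
    have hlen0 : 0 < arr.length := by omega
    have ha0 : PySem.List.pyGetD arr 0 0 = arr[0] := by
      rw [PySem.List.pyGetD_eq_getElem _ _ (by omega) (by omega)]; rfl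
    have htake1 : arr.take 1 = [arr[0]] := by
      rw [show (1 : Nat) = 0 + 1 from rfl, List.take_add_one,
          List.getElem?_eq_getElem hlen0]
      rfl
    have ha0mem : arr[0] ∈ arr.take 1 := by rw [htake1]; simp
    constructor
    · show (if PySem.List.pyGetD arr 0 0 = 0 ∧ t = 0 then (2:Int)
            else if t = 0 ∨ t = PySem.List.pyGetD arr 0 0 then 1 else 0) = cnt (arr.take 1) t
      rw [ha0, htake1, cnt_singleton arr[0] t (hnn _ ha0mem) ht]
    · exact hm
  | succ i ih =>
    intro t m hlen hnn ht hm
    have hlen' : (i : Int) + 1 ≤ arr.length := by push_cast at hlen ⊢; omega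
    have hidx : i + 1 < arr.length := by omega
    have hnn' : ∀ y ∈ arr.take (i + 1), 0 ≤ y := by
      intro y hy
      apply hnn
      have ht2 : arr.take (i + 1) = (arr.take (i + 1 + 1)).take (i + 1) := by
        rw [List.take_take]; congr 1; omega
      exact List.take_subset _ _ (ht2 ▸ hy)
    have hai : PySem.List.pyGetD arr ((i : Int) + 1) 0 = arr[i + 1] := by
      rw [PySem.List.pyGetD_eq_getElem _ _ (by omega) (by omega)]
      congr 1
    have haimem : arr[i + 1]'hidx ∈ arr.take (i + 1 + 1) := by
      have h1 : (arr.take (i + 1 + 1))[i + 1]'(by simp; omega) = arr[i + 1] := List.getElem_take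
      exact h1 ▸ List.getElem_mem _
    have hainn : 0 ≤ arr[i + 1]'hidx := hnn _ haimem
    have htake : arr.take (i + 1 + 1) = arr.take (i + 1) ++ [arr[i + 1]'hidx] := by
      rw [List.take_add_one, List.getElem?_eq_getElem hidx]; rfl
    show (fB arr (i + 1) t m).1 = _ ∧ _
    rw [fB]
    cases hget : m.get? ((i : Int) + 1, t) with
    | some v =>
      refine ⟨?_, hm⟩
      have := hm (i + 1) t v (by push_cast; exact hget)
      simpa using this
    | none =>
      simp only []
      obtain ⟨h1, hI1⟩ := ih t m hlen' hnn' ht hm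
      by_cases hc : PySem.List.pyGetD arr ((i : Int) + 1) 0 ≤ t
      · obtain ⟨h2, hI2⟩ := ih (t - PySem.List.pyGetD arr ((i : Int) + 1) 0)
          (fB arr i t m).2 hlen' hnn' (by rw [hai] at hc ⊢; omega) hI1
        rw [if_pos hc]
        constructor
        · show (fB arr i t m).1 + (fB arr i _ _).1 = _
          rw [h1, h2, htake, cnt_append, hai]
        · -- insert preserves the invariant
          intro j t' v hv
          rw [PySem.Dict.get?_insert] at hv
          by_cases he : ((j : Int), t') = ((i : Int) + 1, t)
          · rw [if_pos he] at hv
            have hj : j = i + 1 := by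
              have := congrArg Prod.fst he; simp at this; omega
            have ht' : t' = t := by have := congrArg Prod.snd he; simpa using this
            cases hv
            rw [hj, ht']
            show (fB arr i t m).1 + (fB arr i _ _).1 = _
            rw [h1, h2, htake, cnt_append, hai]
          · rw [if_neg he] at hv
            exact hI2 j t' v hv
      · rw [if_neg hc]
        have hz : cnt (arr.take (i + 1)) (t - arr[i + 1]'hidx) = 0 :=
          cnt_neg _ _ hnn' (by rw [hai] at hc; omega)
        constructor
        · show (fB arr i t m).1 = _
          rw [h1, htake, cnt_append, hz, add_zero]
        · intro j t' v hv
          rw [PySem.Dict.get?_insert] at hv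
          by_cases he : ((j : Int), t') = ((i : Int) + 1, t)
          · rw [if_pos he] at hv
            have hj : j = i + 1 := by
              have := congrArg Prod.fst he; simp at this; omega
            have ht' : t' = t := by have := congrArg Prod.snd he; simpa using this
            cases hv
            rw [hj, ht']
            show (fB arr i t m).1 = _
            rw [h1, htake, cnt_append, hz, add_zero]
          · rw [if_neg he] at hv
            exact hI1 j t' v hv

-- ---- A side ----

def mrow (K : Int) (p : List Int) : List Int :=
  (PySem.List.pyRange 0 (K + 1)).map (fun c => cnt p c)

theorem base_row (K a0 : Int) (hK : 0 ≤ K) (ha : 0 ≤ a0) :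
    (if a0 ≠ 0 ∧ a0 ≤ K
     then pvSetA (pvSetA (List.replicate (K + 1).toNat (0 : Int)) 0 (if a0 = 0 then 2 else 1)) a0 1
     else pvSetA (List.replicate (K + 1).toNat (0 : Int)) 0 (if a0 = 0 then 2 else 1))
    = mrow K [a0] := by
  set m := (K + 1).toNat with hmdef
  have hK1 : ((m : Int)) = K + 1 := by omega
  have hm1 : 1 ≤ m := by omega
  have e1 : pvSetA (List.replicate m (0 : Int)) 0 (if a0 = 0 then 2 else 1)
      = (List.replicate m (0 : Int)).set 0 (if a0 = 0 then 2 else 1) := by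
    simp only [pvSetA, List.length_replicate]
    rw [if_neg (show ¬((0:Int) < 0) by omega),
        if_pos (show (0:Int) ≤ 0 ∧ (0:Int) < (m : Int) from ⟨le_refl 0, by omega⟩)]
    rfl
  have hlen1 : ((List.replicate m (0 : Int)).set 0 (if a0 = 0 then 2 else 1)).length = m := by
    simp
  rw [mrow, ← hK1, PySem.List.pyRange_zero_natCast, List.map_map, e1]
  by_cases hc : a0 ≠ 0 ∧ a0 ≤ K
  · rw [if_pos hc]
    have e2 : pvSetA ((List.replicate m (0 : Int)).set 0 (if a0 = 0 then 2 else 1)) a0 1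
        = ((List.replicate m (0 : Int)).set 0 (if a0 = 0 then 2 else 1)).set a0.toNat 1 := by
      simp only [pvSetA, hlen1]
      rw [if_neg (show ¬(a0 < 0) by omega),
          if_pos (show (0:Int) ≤ a0 ∧ a0 < (m : Int) from ⟨ha, by omega⟩)]
    rw [e2]
    apply List.ext_getElem
    · simp
    · intro j h1 h2
      simp only [List.getElem_set, List.getElem_map, List.getElem_range, List.getElem_replicate, Function.comp_apply]
      have hj : (j : Int) < K + 1 := by
        simp only [List.length_set, List.length_replicate] at h1; omega
      simp only [cnt, cntF, dlt]
      split_ifs <;> omega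
  · rw [if_neg hc]
    apply List.ext_getElem
    · simp
    · intro j h1 h2
      simp only [List.getElem_set, List.getElem_map, List.getElem_range, List.getElem_replicate, Function.comp_apply]
      have hj : (j : Int) < K + 1 := by
        simp only [List.length_set, List.length_replicate] at h1; omega
      simp only [cnt, cntF, dlt]
      split_ifs <;> omega

theorem mrow_getD (K : Int) (p : List Int) (c : Int) (h0 : 0 ≤ c) (h1 : c < K + 1) :
    PySem.List.pyGetD (mrow K p) c 0 = cnt p c := by
  have hc : c = ((c.toNat : Nat) : Int) := by omega
  have hm : K + 1 = (((K + 1).toNat : Nat) : Int) := by omega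
  rw [mrow, hm, hc, PySem.List.pyGetD_map_pyRange (fun c => cnt p c) _ _ _ (by omega)]

theorem row_step (K : Int) (p : List Int) (x : Int) (hx : 0 ≤ x) (hp : ∀ y ∈ p, 0 ≤ y) :
    ((PySem.List.pyRange 0 (K + 1)).map (fun cur =>
        (if x ≤ cur then PySem.List.pyGetD (mrow K p) (cur - x) 0 else 0)
          + PySem.List.pyGetD (mrow K p) cur 0))
    = mrow K (p ++ [x]) := by
  conv_rhs => rw [mrow]
  apply List.map_congr_left
  intro cur hcur
  obtain ⟨h0, h1⟩ := PySem.List.mem_pyRange_one.mp hcur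
  rw [mrow_getD K p cur h0 h1, cnt_append]
  by_cases hx2 : x ≤ cur
  · rw [if_pos hx2, mrow_getD K p (cur - x) (by omega) (by omega)]; ring
  · rw [if_neg hx2, cnt_neg p (cur - x) hp (by omega)]; ring

theorem dp_rows (arr : List Int) (K : Int) :
    ∀ (t : Nat), (t : Int) + 1 ≤ arr.length → (∀ y ∈ arr.take (t + 1), 0 ≤ y) →
    (PySem.List.pyRange 1 (1 + (t : Int))).foldl (fun dp i =>
        dp ++ [(PySem.List.pyRange 0 (K + 1)).map (fun cur =>
          (if PySem.List.pyGetD arr i 0 ≤ cur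
           then PySem.List.pyGetD (PySem.List.pyGetD dp (i - 1) [])
                  (cur - PySem.List.pyGetD arr i 0) 0 else 0)
            + PySem.List.pyGetD (PySem.List.pyGetD dp (i - 1) []) cur 0)]) [mrow K (arr.take 1)]
      = (List.range (t + 1)).map (fun j => mrow K (arr.take (j + 1))) := by
  intro t
  induction t with
  | zero =>
    intro _ _
    have h0 : PySem.List.pyRange 1 (1 + ((0 : Nat) : Int)) = [] := rfl
    rw [h0]
    simp
  | succ t ih =>
    intro h1 h2
    have hlen : t + 1 + 1 ≤ arr.length := by push_cast at h1; omega
    have h2' : ∀ y ∈ arr.take (t + 1), 0 ≤ y := by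
      intro y hy
      apply h2
      have ht : arr.take (t + 1) = (arr.take (t + 1 + 1)).take (t + 1) := by
        rw [List.take_take]; congr 1; omega
      exact List.take_subset _ _ (ht ▸ hy)
    have hpre : PySem.List.pyRange 1 (1 + ((t + 1 : Nat) : Int))
        = PySem.List.pyRange 1 (1 + (t : Int)) ++ [1 + (t : Int)] := by
      have h := PySem.List.pyRange_one_succ_right (a := 1) (b := 1 + (t : Int)) (by omega)
      rw [show (1 + ((t + 1 : Nat) : Int)) = 1 + (t : Int) + 1 by push_cast; ring]
      exact h
    rw [hpre, List.foldl_append, ih (by omega) h2',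
        List.foldl_cons, List.foldl_nil]
    have hidx : (1 : Int) + (t : Int) - 1 = ((t : Nat) : Int) := by ring
    have hprev : PySem.List.pyGetD
        ((List.range (t + 1)).map (fun j => mrow K (arr.take (j + 1)))) (1 + (t : Int) - 1) []
        = mrow K (arr.take (t + 1)) := by
      rw [hidx, PySem.List.pyGetD_eq_getElem _ _ (by omega) (by simp)]
      simp
    have hx : PySem.List.pyGetD arr (1 + (t : Int)) 0 = arr[t + 1]'(by omega) := by
      rw [PySem.List.pyGetD_eq_getElem _ _ (by omega) (by omega)]
      congr 1
      omega
    have hxmem : arr[t + 1]'(by omega) ∈ arr.take (t + 1 + 1) := by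
      have : (arr.take (t + 1 + 1))[t + 1]'(by simp; omega) = arr[t + 1]'(by omega) :=
        List.getElem_take
      exact this ▸ List.getElem_mem _
    have htake : arr.take (t + 1 + 1) = arr.take (t + 1) ++ [arr[t + 1]'(by omega)] := by
      rw [List.take_add_one, List.getElem?_eq_getElem (by omega)]
      rfl
    simp only [hprev, hx]
    rw [row_step K (arr.take (t + 1)) _ (h2 _ hxmem) h2', ← htake]
    simp [List.range_succ]

-- ===== VERDICT (by name: the statement is the Claim_ definition above) =====
theorem countPartitions2_spec : Claim_equal_countPartitions2 := by
  intro n d arr _ hpre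
  unfold Spec_countPartitions2
  simp only [countPartitions2, countPartitions2_alt]
  by_cases hg : arr.sum - d < 0 ∨ PySem.Int.mod (arr.sum - d) 2 ≠ 0
  · rw [if_pos hg, if_pos hg]
  · rw [if_neg hg, if_neg hg]
    obtain ⟨hn1, hnl, hpos⟩ : 1 ≤ n ∧ n ≤ arr.length ∧ ∀ x ∈ arr.take n.toNat, 0 ≤ x := by
      rcases hpre with h | h
      · exact absurd h hg
      · exact h
    rw [not_or] at hg
    obtain ⟨hg1, -⟩ := hg
    set K := PySem.Int.floordiv (arr.sum - d) 2 with hKdef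
    have hK : 0 ≤ K := by
      rw [hKdef, PySem.Int.floordiv_eq_ediv_of_pos (by omega)]
      exact Int.ediv_nonneg (by omega) (by omega)
    congr 1
    -- B side: the memoized recursion computes cnt of the full prefix
    have hInv0 : InvB arr PySem.Dict.empty := by
      intro i t v hv
      simp [PySem.Dict.get?_empty] at hv
    have hlenB : (((n - 1).toNat : Nat) : Int) + 1 ≤ arr.length := by omega
    have htakeB : (n - 1).toNat + 1 = n.toNat := by omega
    have hnnB : ∀ y ∈ arr.take ((n - 1).toNat + 1), 0 ≤ y := by
      rw [htakeB]; exact hpos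
    have hB : (fB arr (n - 1).toNat K PySem.Dict.empty).1 = cnt (arr.take n.toNat) K := by
      have := (fB_correct arr (n - 1).toNat K PySem.Dict.empty hlenB hnnB hK hInv0).1
      rw [this, htakeB]
    rw [hB]
    -- A side
    have hlen0 : 0 < arr.length := by omega
    have ha0 : PySem.List.pyGetD arr 0 0 = arr[0] := by
      rw [PySem.List.pyGetD_eq_getElem _ _ (by omega) (by omega)]
      rfl
    have ha0mem : arr[0] ∈ arr.take n.toNat := by
      have h1 : (arr.take n.toNat)[0]'(by simp; omega) = arr[0] := List.getElem_take
      exact h1 ▸ List.getElem_mem _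
    have ha0nn : 0 ≤ PySem.List.pyGetD arr 0 0 := by rw [ha0]; exact hpos _ ha0mem
    have htake1 : [PySem.List.pyGetD arr 0 0] = arr.take 1 := by
      rw [ha0, show (1 : Nat) = 0 + 1 from rfl, List.take_add_one,
          List.getElem?_eq_getElem hlen0]
      rfl
    rw [base_row K (PySem.List.pyGetD arr 0 0) hK ha0nn, htake1]
    set t : Nat := (n - 1).toNat with htdef
    have hn : n = 1 + (t : Int) := by omega
    have ht1 : (t : Int) + 1 ≤ arr.length := by omega
    have ht2 : ∀ y ∈ arr.take (t + 1), 0 ≤ y := by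
      intro y hy
      apply hpos
      have : t + 1 = n.toNat := by omega
      exact this ▸ hy
    rw [hn, dp_rows arr K t ht1 ht2]
    have hread : PySem.List.pyGetD
        ((List.range (t + 1)).map (fun j => mrow K (arr.take (j + 1)))) (1 + (t : Int) - 1) []
        = mrow K (arr.take (t + 1)) := by
      rw [show (1 : Int) + (t : Int) - 1 = ((t : Nat) : Int) by ring,
          PySem.List.pyGetD_eq_getElem _ _ (by omega) (by simp)]
      simp
    rw [hread, mrow_getD K _ K hK (by omega)]
    congr 2
    omega
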